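-- pv_equiv track=rewrite | github.com/AnimeshJaiswal11/leetcode-solutions | leet.py | aggressive_cow
-- ===== SOURCE A (Python) =====
-- def aggressive_cow(A,c):
--     low = 1
--     n = len(A)
--     high = n-1
--     def works(A,c,guess,n):
--         stall = 1
--         prev_stall = 0
--         for i in range(1,c):
--             while A[stall] - A[prev_stall] < guess:
--                 stall += 1
--                 if stall == n:
--                     return False
--             prev_stall = stall
--         return True
--     ans = 0
--     while low <= high:
--         mid = int(low + (high-low)/2)
--         if works(A,c,mid,n):
--             low = mid + 1
--             ans = max(ans,mid)
--         else:
--             high = mid - 1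
--     return ans
-- ===== SOURCE B (Python) =====
-- def aggressive_cow(A, c):
--     n = len(A)
--
--     def placed(gap):
--         # flat greedy counting pass: cows placed when gaps are required to be >= gap
--         count, last = 1, A[0]
--         for x in A[1:]:
--             if x - last >= gap:
--                 count += 1
--                 last = x
--         return count
--
--     # The greedy count is non-increasing in the gap, so the answer is simply the
--     # largest candidate gap in [1, n-1] that still fits c cows: scan downward.
--     g = n - 1
--     while g >= 1:
--         if placed(g) >= c:
--             return g
--         g -= 1
--     return 0
-- ===== Notes on version B (the rewrite author's own statement) =====
-- stated objective: alternative
-- what changed: B eliminates A's binary search entirely: since the greedy placement count is non-increasing in the required gap (proved as the monotonicity lemmas in the Lean file), the answer is the largest gap in [1, n-1] whose flat greedy counting pass still fits c cows, found by a plain descending linear scan instead of A's while-loop binary search with a nested two-pointer feasibility helper.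
import Mathlib
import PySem

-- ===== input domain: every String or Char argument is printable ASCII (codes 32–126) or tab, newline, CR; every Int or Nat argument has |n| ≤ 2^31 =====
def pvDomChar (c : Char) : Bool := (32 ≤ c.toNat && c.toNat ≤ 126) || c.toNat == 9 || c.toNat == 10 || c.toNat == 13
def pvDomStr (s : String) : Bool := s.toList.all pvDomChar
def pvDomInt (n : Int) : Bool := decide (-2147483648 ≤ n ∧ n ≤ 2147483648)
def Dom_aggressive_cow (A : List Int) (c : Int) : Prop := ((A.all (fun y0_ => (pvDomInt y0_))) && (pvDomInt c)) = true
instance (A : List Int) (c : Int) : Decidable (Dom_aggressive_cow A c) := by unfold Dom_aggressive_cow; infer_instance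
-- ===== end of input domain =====

-- B removes A's binary search: the greedy count is monotone in the gap, so B finds the
-- answer by a descending linear scan of candidate gaps with a flat counting pass
-- (a different algorithm of the same result; not claimed faster).

-- ===== PORT A =====
-- inner 'while A[stall]-A[prev_stall] < guess' loop of works(); fuel n.toNat+1 covers every
-- reachable iteration count (stall increases up to n), so the fuel branch is never hit.
-- A[stall]/A[prev_stall] are in range whenever works is called (1 ≤ stall,prev < n); .getD 0 is unreachable.
def acInner (A : List Int) (guess n prev : Int) : Nat → Int → Option Int
  | 0, _ => none
  | Nat.succ fuel, stall =>
    if (PySem.List.pyGet? A stall).getD 0 - (PySem.List.pyGet? A prev).getD 0 < guess then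
      if stall + 1 = n then none else acInner A guess n prev fuel (stall + 1)
    else some stall

-- 'for i in range(1,c)' of works(): (c-1).toNat iterations over state (stall, prev_stall)
def acLoop (A : List Int) (guess n : Int) : Nat → Int → Int → Bool
  | 0, _, _ => true
  | Nat.succ k, stall, prev =>
    match acInner A guess n prev (n.toNat + 1) stall with
    | none => false
    | some s => acLoop A guess n k s s

def acWorks (A : List Int) (c guess n : Int) : Bool :=
  acLoop A guess n (c - 1).toNat 1 0

-- 'while low <= high' binary search; fuel A.length+1 ≥ number of iterations (interval shrinks).
-- mid = int(low + (high-low)/2): exact float halving at these magnitudes = low + (high-low)//2.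
def acSearch (A : List Int) (c : Int) : Nat → Int → Int → Int → Int
  | 0, _, _, ans => ans
  | Nat.succ f, low, high, ans =>
    if low ≤ high then
      let mid := low + PySem.Int.floordiv (high - low) 2
      if acWorks A c mid (A.length : Int) then
        acSearch A c f (mid + 1) high (max ans mid)
      else
        acSearch A c f low (mid - 1) ans
    else ans

def aggressive_cow (A : List Int) (c : Int) : Int :=
  acSearch A c (A.length + 1) 1 ((A.length : Int) - 1) 0

-- ===== PORT B =====
-- placed(gap): flat counting pass 'count=1, last=A[0], for x in A[1:]';
-- A[0] is in range whenever placed is called (only for gap ≥ 1, so n ≥ 2).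
def altPlaced (A : List Int) (gap : Int) : Int :=
  ((PySem.List.slice A (some 1) none).foldl
    (fun st x => if gap ≤ x - st.2 then (st.1 + 1, x) else st)
    (1, (PySem.List.pyGet? A 0).getD 0)).1

-- 'g = n-1; while g >= 1: if placed(g) >= c: return g; g -= 1; return 0'
-- descending scan, structural recursion on the Nat value of g
def altScan (A : List Int) (c : Int) : Nat → Int
  | 0 => 0
  | Nat.succ g =>
    if c ≤ altPlaced A ((g : Int) + 1) then (g : Int) + 1 else altScan A c g

def aggressive_cow_alt (A : List Int) (c : Int) : Int :=
  altScan A c (A.length - 1)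

-- ===== PRECONDITION & SPEC =====
def Spec_aggressive_cow (A : List Int) (c : Int) (out : Int) : Prop := out = aggressive_cow_alt A c
instance (A : List Int) (c : Int) (out : Int) : Decidable (Spec_aggressive_cow A c out) := by unfold Spec_aggressive_cow; infer_instance

-- ===== CLAIM (what is proved, stated in full; the proofs are below) =====
def Claim_equal_aggressive_cow : Prop := ∀ (A : List Int) (c : Int), Dom_aggressive_cow A c → Spec_aggressive_cow A c (aggressive_cow A c)

-- ===== LEMMAS AND PROOFS =====

-- greedy placement count over a suffix, starting after a cow at value `last`
def gcount (mid : Int) : List Int → Int → Int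
  | [], _ => 0
  | x :: xs, last => if mid ≤ x - last then 1 + gcount mid xs x else gcount mid xs last

theorem gcount_nonneg (mid : Int) (l : List Int) (last : Int) : 0 ≤ gcount mid l last := by
  induction l generalizing last with
  | nil => simp [gcount]
  | cons x xs ih =>
    simp only [gcount]
    split
    · linarith [ih x]
    · exact ih last

theorem altPlaced_fst (mid : Int) (l : List Int) (k last : Int) :
    (l.foldl (fun st x => if mid ≤ x - st.2 then (st.1 + 1, x) else st) ((k, last) : Int × Int)).1
      = k + gcount mid l last := by
  induction l generalizing k last with
  | nil => simp [gcount]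
  | cons x xs ih =>
    simp only [List.foldl_cons, gcount]
    split
    · rw [ih]; ring
    · rw [ih]

theorem altPlaced_eq (A : List Int) (mid : Int) :
    altPlaced A mid = 1 + gcount mid (A.drop 1) ((PySem.List.pyGet? A 0).getD 0) := by
  have hsl : PySem.List.slice A (some 1) none = A.drop 1 := by
    simp [pysem]
  rw [altPlaced, hsl, altPlaced_fst]

-- monotonicity of the greedy count (holds for arbitrary, even unsorted, lists):
-- (L2) larger required gap and later start never place more cows;
-- (L4) moving the start forward to any x with x < last + mid loses at most one cow.
theorem gcount_mono (l : List Int) :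
    (∀ m m' b b', m ≤ m' → b ≤ b' → gcount m' l b' ≤ gcount m l b) ∧
    (∀ m b x, x < b + m → gcount m l b ≤ 1 + gcount m l x) := by
  induction l with
  | nil => constructor <;> intros <;> simp [gcount]
  | cons y ys ih =>
    obtain ⟨ih2, ih4⟩ := ih
    constructor
    · intro m m' b b' hm hb
      simp only [gcount]
      by_cases h' : m' ≤ y - b'
      · rw [if_pos h', if_pos (by omega : m ≤ y - b)]
        have := ih2 m m' y y hm le_rfl
        omega
      · rw [if_neg h']
        by_cases h : m ≤ y - b
        · rw [if_pos h]
          have h1 := ih4 m' b' y (by omega)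
          have h2 := ih2 m m' y y hm le_rfl
          omega
        · rw [if_neg h]
          exact ih2 m m' b b' hm hb
    · intro m b x hx
      simp only [gcount]
      by_cases h : m ≤ y - b
      · rw [if_pos h]
        by_cases h' : m ≤ y - x
        · rw [if_pos h']
          omega
        · rw [if_neg h']
          have := ih2 m m x y le_rfl (by omega)
          omega
      · rw [if_neg h]
        by_cases h' : m ≤ y - x
        · rw [if_pos h']
          have := ih4 m b y (by omega)
          omega
        · rw [if_neg h']
          exact ih4 m b x hx

theorem altPlaced_mono (A : List Int) (m m' : Int) (h : m ≤ m') :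
    altPlaced A m' ≤ altPlaced A m := by
  rw [altPlaced_eq, altPlaced_eq]
  have := (gcount_mono (A.drop 1)).1 m m' ((PySem.List.pyGet? A 0).getD 0)
    ((PySem.List.pyGet? A 0).getD 0) h le_rfl
  omega

-- first placement: scan for the first element with gap ≥ mid
def gplace (mid last : Int) : List Int → Option (Int × List Int)
  | [] => none
  | x :: xs => if mid ≤ x - last then some (x, xs) else gplace mid last xs

theorem gcount_gplace (mid last : Int) (l : List Int) :
    gcount mid l last = match gplace mid last l with
      | none => 0
      | some (x, rest) => 1 + gcount mid rest x := by
  induction l generalizing last with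
  | nil => simp [gplace, gcount]
  | cons x xs ih =>
    simp only [gplace, gcount]
    split
    · simp
    · exact ih last

theorem acInner_spec (A : List Int) (guess n prev : Int) (hn : n = (A.length : Int)) :
    ∀ (fuel : Nat) (s : Nat), s < A.length → A.length - s ≤ fuel →
      (acInner A guess n prev fuel (s : Int) = none ∧
        gplace guess ((PySem.List.pyGet? A prev).getD 0) (A.drop s) = none)
      ∨ (∃ t : Nat, acInner A guess n prev fuel (s : Int) = some ((t : Int)) ∧ t < A.length ∧
          gplace guess ((PySem.List.pyGet? A prev).getD 0) (A.drop s) =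
            some ((PySem.List.pyGet? A (t : Int)).getD 0, A.drop (t + 1))) := by
  intro fuel
  induction fuel with
  | zero => intro s hs hf; omega
  | succ fuel ih =>
    intro s hs hf
    have hget : (PySem.List.pyGet? A (s : Int)).getD 0 = A[s] := by
      simp [PySem.List.pyGet?_natCast, List.getElem?_eq_getElem hs]
    have hdrop : A.drop s = A[s] :: A.drop (s + 1) := List.drop_eq_getElem_cons hs
    simp only [acInner, hget]
    by_cases hc : A[s] - (PySem.List.pyGet? A prev).getD 0 < guess
    · simp only [if_pos hc]
      by_cases he : (s : Int) + 1 = n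
      · left
        refine ⟨by simp [he], ?_⟩
        rw [hdrop]
        simp only [gplace, if_neg (by omega : ¬ guess ≤ A[s] - (PySem.List.pyGet? A prev).getD 0)]
        have hnil : A.drop (s + 1) = [] := List.drop_eq_nil_of_le (by omega)
        simp [hnil, gplace]
      · have hs1 : s + 1 < A.length := by omega
        have hcast : (s : Int) + 1 = ((s + 1 : Nat) : Int) := by push_cast; ring
        rw [if_neg he, hcast]
        have hih := ih (s + 1) hs1 (by omega)
        rw [hdrop]
        simpa [gplace, if_neg (by omega : ¬ guess ≤ A[s] - (PySem.List.pyGet? A prev).getD 0)] using hih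
    · right
      refine ⟨s, by rw [if_neg hc], hs, ?_⟩
      rw [hdrop]
      simp only [gplace, if_pos (by omega : guess ≤ A[s] - (PySem.List.pyGet? A prev).getD 0)]
      rw [hget]

theorem acLoop_spec (A : List Int) (guess : Int) (hg : 1 ≤ guess) :
    ∀ (k : Nat) (s : Nat), s < A.length →
      acLoop A guess (A.length : Int) k (s : Int) (s : Int)
        = decide ((k : Int) ≤ gcount guess (A.drop (s + 1)) ((PySem.List.pyGet? A (s : Int)).getD 0)) := by
  intro k
  induction k with
  | zero =>
    intro s hs
    simp [acLoop, gcount_nonneg]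
  | succ k ih =>
    intro s hs
    have htoNat : ((A.length : Int)).toNat = A.length := by omega
    simp only [acLoop, htoNat]
    have hstep : acInner A guess (A.length : Int) (s : Int) (A.length + 1) (s : Int)
        = if (s : Int) + 1 = (A.length : Int) then none
          else acInner A guess (A.length : Int) (s : Int) A.length ((s : Int) + 1) := by
      simp only [acInner]
      rw [if_pos (by omega :
        (PySem.List.pyGet? A (s : Int)).getD 0 - (PySem.List.pyGet? A (s : Int)).getD 0 < guess)]
    by_cases he : (s : Int) + 1 = (A.length : Int)
    · rw [hstep, if_pos he]
      have hnil : A.drop (s + 1) = [] := List.drop_eq_nil_of_le (by omega)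
      simp only [hnil, gcount]
      symm
      rw [decide_eq_false_iff_not]
      push_cast
      omega
    · have hs1 : s + 1 < A.length := by omega
      have hcast : (s : Int) + 1 = ((s + 1 : Nat) : Int) := by push_cast; ring
      rw [hstep, if_neg he, hcast]
      rcases acInner_spec A guess (A.length : Int) (s : Int) rfl A.length (s + 1) hs1 (by omega) with
        ⟨hnone, hgp⟩ | ⟨t, hsome, ht, hgp⟩
      · rw [hnone]
        have h0 : gcount guess (A.drop (s + 1)) ((PySem.List.pyGet? A (s : Int)).getD 0) = 0 := by
          rw [gcount_gplace, hgp]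
        simp only [h0]
        symm
        rw [decide_eq_false_iff_not]
        push_cast
        omega
      · rw [hsome]
        show acLoop A guess (A.length : Int) k (t : Int) (t : Int)
          = decide (((k + 1 : Nat) : Int) ≤ gcount guess (A.drop (s + 1)) ((PySem.List.pyGet? A (s : Int)).getD 0))
        have hgc : gcount guess (A.drop (s + 1)) ((PySem.List.pyGet? A (s : Int)).getD 0)
            = 1 + gcount guess (A.drop (t + 1)) ((PySem.List.pyGet? A (t : Int)).getD 0) := by
          rw [gcount_gplace, hgp]
        rw [ih t ht, hgc, decide_eq_decide]
        push_cast
        omega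

theorem acWorks_eq (A : List Int) (c guess : Int) (hg : 1 ≤ guess) (hlen : 2 ≤ A.length) :
    acWorks A c guess (A.length : Int) = decide (c ≤ altPlaced A guess) := by
  rw [altPlaced_eq]
  have hgn := gcount_nonneg guess (A.drop 1) ((PySem.List.pyGet? A 0).getD 0)
  by_cases hc : c ≤ 1
  · have h0 : (c - 1).toNat = 0 := by omega
    rw [acWorks, h0]
    simp only [acLoop]
    symm
    rw [decide_eq_true_iff]
    omega
  · have h1 : 1 < A.length := by omega
    have hk : (c - 1).toNat = ((c - 2).toNat) + 1 := by omega
    rw [acWorks, hk]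
    have htoNat : ((A.length : Int)).toNat = A.length := by omega
    simp only [acLoop, htoNat]
    have h1c : ((1 : Nat) : Int) = (1 : Int) := by norm_num
    rcases acInner_spec A guess (A.length : Int) 0 rfl (A.length + 1) 1 h1 (by omega) with
      ⟨hnone, hgp⟩ | ⟨t, hsome, ht, hgp⟩
    · rw [h1c] at hnone
      rw [hnone]
      have h0 : gcount guess (A.drop 1) ((PySem.List.pyGet? A 0).getD 0) = 0 := by
        rw [gcount_gplace, hgp]
      rw [h0]
      symm
      rw [decide_eq_false_iff_not]
      omega
    · rw [h1c] at hsome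
      rw [hsome]
      show acLoop A guess (A.length : Int) (c - 2).toNat (t : Int) (t : Int)
        = decide (c ≤ 1 + gcount guess (A.drop 1) ((PySem.List.pyGet? A 0).getD 0))
      rw [acLoop_spec A guess hg _ t ht]
      have hgc : gcount guess (A.drop 1) ((PySem.List.pyGet? A 0).getD 0)
          = 1 + gcount guess (A.drop (t + 1)) ((PySem.List.pyGet? A (t : Int)).getD 0) := by
        rw [gcount_gplace, hgp]
      rw [hgc, decide_eq_decide]
      omega

-- altScan returns 0 when no candidate gap in [1, t] is feasible
theorem altScan_none (A : List Int) (c : Int) :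
    ∀ t : Nat, (∀ g : Int, 1 ≤ g → g ≤ (t : Int) → ¬ c ≤ altPlaced A g) →
      altScan A c t = 0 := by
  intro t
  induction t with
  | zero => intro _; rfl
  | succ t ih =>
    intro h
    simp only [altScan]
    rw [if_neg (h ((t : Int) + 1) (by omega) (by push_cast; omega))]
    exact ih fun g h1 h2 => h g h1 (by push_cast; omega)

-- altScan returns `ans` when ans ∈ [1, t] is feasible and everything above it is not
theorem altScan_found (A : List Int) (c : Int) :
    ∀ (t : Nat) (ans : Int), 1 ≤ ans → ans ≤ (t : Int) → c ≤ altPlaced A ans →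
      (∀ g : Int, ans < g → g ≤ (t : Int) → ¬ c ≤ altPlaced A g) →
      altScan A c t = ans := by
  intro t
  induction t with
  | zero => intro ans h1 h2 _ _; omega
  | succ t ih =>
    intro ans h1 h2 hfeas habove
    simp only [altScan]
    by_cases he : ans = (t : Int) + 1
    · rw [if_pos (he ▸ hfeas), he]
    · rw [if_neg (habove ((t : Int) + 1) (by push_cast at h2 ⊢; omega) (by push_cast; omega))]
      exact ih ans h1 (by push_cast at h2 ⊢; omega) hfeas
        (fun g hg1 hg2 => habove g hg1 (by push_cast; omega))

-- exit of the binary search: once high < low, `ans` is B's answer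
theorem acExit (A : List Int) (c : Int) (hlen : 2 ≤ A.length)
    (low high ans : Int) (_hhigh : high ≤ (A.length : Int) - 1)
    (hansle : ans ≤ (A.length : Int) - 1)
    (hinv : (ans = 0 ∧ low = 1) ∨ (1 ≤ ans ∧ ans = low - 1 ∧ c ≤ altPlaced A ans))
    (hup : ∀ g : Int, low ≤ g → g ≤ (A.length : Int) - 1 → c ≤ altPlaced A g → g ≤ high)
    (hle : high < low) : ans = aggressive_cow_alt A c := by
  have hcast : (((A.length - 1 : Nat)) : Int) = (A.length : Int) - 1 := by omega
  have hnofeas : ∀ g : Int, low ≤ g → g ≤ (A.length : Int) - 1 → ¬ c ≤ altPlaced A g := by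
    intro g hg1 hg2 hg3
    have := hup g hg1 hg2 hg3
    omega
  rcases hinv with ⟨h0, hl1⟩ | ⟨hans1, hansl, hfeas⟩
  · rw [h0, aggressive_cow_alt]
    symm
    refine altScan_none A c _ ?_
    intro g hg1 hg2
    rw [hcast] at hg2
    exact hnofeas g (by omega) hg2
  · rw [aggressive_cow_alt]
    symm
    refine altScan_found A c _ ans hans1 (by rw [hcast]; omega) hfeas ?_
    intro g hg1 hg2
    rw [hcast] at hg2
    exact hnofeas g (by omega) hg2

-- binary-search invariant: acSearch computes B's answer
theorem acSearch_inv (A : List Int) (c : Int) (hlen : 2 ≤ A.length) :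
    ∀ (fuel : Nat) (low high ans : Int),
      1 ≤ low → high ≤ (A.length : Int) - 1 → ans ≤ (A.length : Int) - 1 →
      high - low < (fuel : Int) - 1 →
      ((ans = 0 ∧ low = 1) ∨ (1 ≤ ans ∧ ans = low - 1 ∧ c ≤ altPlaced A ans)) →
      (∀ g : Int, low ≤ g → g ≤ (A.length : Int) - 1 → c ≤ altPlaced A g → g ≤ high) →
      acSearch A c fuel low high ans = aggressive_cow_alt A c := by
  intro fuel
  induction fuel with
  | zero =>
    intro low high ans hlow hhigh hansle hf hinv hup
    exact acExit A c hlen low high ans hhigh hansle hinv hup (by push_cast at hf; omega)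
  | succ f ih =>
    intro low high ans hlow hhigh hansle hf hinv hup
    by_cases hle : low ≤ high
    · simp only [acSearch, if_pos hle]
      obtain ⟨hm1, hm2⟩ := PySem.Int.floordiv_two_mid_bounds hle
      have hmid : low + PySem.Int.floordiv (high - low) 2 = PySem.Int.floordiv (low + high) 2 := by
        rw [PySem.Int.floordiv_eq_ediv_of_pos (by norm_num),
            PySem.Int.floordiv_eq_ediv_of_pos (by norm_num)]
        omega
      rw [hmid]
      set mid := PySem.Int.floordiv (low + high) 2 with hmiddef
      rw [acWorks_eq A c mid (by omega) hlen]
      by_cases hw : c ≤ altPlaced A mid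
      · rw [if_pos (by rw [decide_eq_true_iff]; exact hw)]
        have hmax : max ans mid = mid := by
          rcases hinv with ⟨h0, _⟩ | ⟨_, he, _⟩ <;> omega
        rw [hmax]
        refine ih (mid + 1) high mid (by omega) hhigh (by omega) (by push_cast at hf ⊢; omega)
          (Or.inr ⟨by omega, by omega, hw⟩) ?_
        intro g hg1 hg2 hg3
        exact hup g (by omega) hg2 hg3
      · rw [if_neg (by rw [decide_eq_true_iff]; exact hw)]
        refine ih low (mid - 1) ans hlow (by omega) hansle (by push_cast at hf ⊢; omega) hinv ?_
        intro g hg1 hg2 hg3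
        have hgh := hup g hg1 hg2 hg3
        by_contra hcon
        exact hw (le_trans hg3 (altPlaced_mono A mid g (by omega)))
    · simp only [acSearch, if_neg hle]
      exact acExit A c hlen low high ans hhigh hansle hinv hup (by omega)

-- ===== VERDICT (by name: the statement is the Claim_ definition above) =====
theorem aggressive_cow_spec : Claim_equal_aggressive_cow := by
  intro A c _
  unfold Spec_aggressive_cow
  by_cases hlen : 2 ≤ A.length
  · unfold aggressive_cow
    exact acSearch_inv A c hlen (A.length + 1) 1 ((A.length : Int) - 1) 0
      (by omega) (by omega) (by omega) (by push_cast; omega)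
      (Or.inl ⟨rfl, rfl⟩) (fun g _ hg2 _ => hg2)
  · -- n ≤ 1: A's binary search is skipped (high ≤ 0 < 1), B's scan is empty
    interval_cases h : A.length <;>
      simp_all [aggressive_cow, aggressive_cow_alt, acSearch, altScan]
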